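-- pv_equiv track=rewrite | github.com/ziqun-liu/TIP103-3 | week2/session2/week2_session2_problem3.py | organize_exhibition
-- ===== SOURCE A (Python) =====
-- def organize_exhibition(collection):
--     """
--     U
--         - input list of strings
--         - output list of lists of strings
--     M
--         - hashset for occurrences
--     P
--         - use a counter hashmap
--         - loop through each string in map
--         - decrement 1 occurrence each iteration, append strings to temp string
--         - append temp string to result string each iteration
--     """
--     cnt = {}
--     for one in collection:
--         cnt[one] = cnt.get(one, 0) + 1
--
--     res = []
--     while cnt:
--         temp = []
--         to_delete = []
--         for string in cnt:
--             temp.append(string)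
--             cnt[string] -= 1
--             if cnt[string] == 0:
--                 to_delete.append(string)
--         for string in to_delete:
--             del cnt[string]
--         res.append(temp)
--
--     return res
-- ===== SOURCE B (Python) =====
-- def organize_exhibition(collection):
--     cnt = {}
--     for one in collection:
--         cnt[one] = cnt.get(one, 0) + 1
--     m = max(cnt.values(), default=0)
--     res = [[] for _ in range(m)]
--     for item, c in cnt.items():
--         for r in range(c):
--             res[r].append(item)
--     return res
-- ===== Notes on version B (the rewrite author's own statement) =====
-- stated objective: alternative
-- what changed: Instead of A's while-loop that repeatedly sweeps the counter dict (decrementing every count, collecting and deleting exhausted keys each round), B computes the maximum count once, allocates that many empty rounds, and distributes each distinct item into its first count rounds in a single pass over the counter.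
import Mathlib
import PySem

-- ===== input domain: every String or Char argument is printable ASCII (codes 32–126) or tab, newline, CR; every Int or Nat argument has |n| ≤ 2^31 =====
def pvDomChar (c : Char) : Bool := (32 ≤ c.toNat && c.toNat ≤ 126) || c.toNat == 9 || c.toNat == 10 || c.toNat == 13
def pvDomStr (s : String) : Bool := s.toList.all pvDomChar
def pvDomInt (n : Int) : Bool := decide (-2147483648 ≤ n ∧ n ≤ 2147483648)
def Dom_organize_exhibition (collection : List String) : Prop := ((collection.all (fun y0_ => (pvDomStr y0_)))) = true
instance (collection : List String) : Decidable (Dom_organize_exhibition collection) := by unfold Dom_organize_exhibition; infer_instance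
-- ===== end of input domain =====

-- B replaces A's repeated decrement-and-delete sweeps over the counter by computing the max count
-- once and distributing each distinct item into its first `count` rounds (objective: alternative).


-- ===== PORT A =====
-- the `while cnt:` loop: temp = the keys; every count is decremented; keys whose count became 0
-- are deleted (order of the remaining entries is preserved, as in Python).  The loop is
-- fuel-guarded for totality only: collection.length ≥ max count = the number of iterations.
def oeLoopA : Nat → List (String × Int) → List (List String)
  | 0, _ => []
  | fuel + 1, items =>
    if items = [] then []
    else
      (items.map Prod.fst) ::
        oeLoopA fuel ((items.map (fun p => (p.1, p.2 - 1))).filter (fun p => !(p.2 == 0)))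

def organize_exhibition (collection : List String) : List (List String) :=
  let cnt := collection.foldl (fun d one => d.insert one (d.getD one 0 + 1)) PySem.Dict.empty
  oeLoopA collection.length cnt.items

-- ===== PORT B =====
-- `for r in range(c): res[r].append(item)` — append item to the first c rows
def oeAddRows : List (List String) → Int → String → List (List String)
  | [], _, _ => []
  | row :: rest, c, item =>
    if 0 < c then (row ++ [item]) :: oeAddRows rest (c - 1) item
    else row :: rest

def organize_exhibition_alt (collection : List String) : List (List String) :=
  let cnt := collection.foldl (fun d one => d.insert one (d.getD one 0 + 1)) PySem.Dict.empty
  let m := PySem.List.maxD cnt.values (fun v => v) 0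
  let res := List.replicate m.toNat ([] : List String)
  cnt.items.foldl (fun res p => oeAddRows res p.2 p.1) res

-- ===== PRECONDITION & SPEC =====
def Spec_organize_exhibition (collection : List String) (out : List (List String)) : Prop := out = organize_exhibition_alt collection
instance (collection : List String) (out : List (List String)) : Decidable (Spec_organize_exhibition collection out) := by unfold Spec_organize_exhibition; infer_instance

-- ===== CLAIM (what is proved, stated in full; the proofs are below) =====
def Claim_equal_organize_exhibition : Prop := ∀ (collection : List String), Dom_organize_exhibition collection → Spec_organize_exhibition collection (organize_exhibition collection)

-- ===== LEMMAS AND PROOFS =====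

-- row r of the result: the keys whose count exceeds r, in dict order
def oeRow (L : List (String × Int)) (r : Nat) : List String :=
  (L.filter (fun p => decide ((r : Int) < p.2))).map Prod.fst

def oeRows (L : List (String × Int)) (m : Nat) : List (List String) :=
  (List.range m).map (oeRow L)

lemma oeRow_zero (L : List (String × Int)) (h1 : ∀ p ∈ L, 1 ≤ p.2) :
    oeRow L 0 = L.map Prod.fst := by
  unfold oeRow
  rw [List.filter_eq_self.mpr]
  intro p hp
  simpa using by have := h1 p hp; omega

lemma oeRow_shift (L : List (String × Int)) (r : Nat) (h1 : ∀ p ∈ L, 1 ≤ p.2) :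
    oeRow ((L.map (fun p => (p.1, p.2 - 1))).filter (fun p => !(p.2 == 0))) r
      = oeRow L (r + 1) := by
  unfold oeRow
  rw [List.filter_filter, List.filter_map, List.map_map]
  have hfst : (Prod.fst ∘ fun (p : String × Int) => (p.1, p.2 - 1)) = Prod.fst := by
    funext p; rfl
  rw [hfst]
  congr 1
  apply List.filter_congr
  intro x hx
  have hx1 := h1 x hx
  simp only [Function.comp]
  have hcast : ((r + 1 : Nat) : Int) = (r : Int) + 1 := by push_cast; ring
  by_cases hc : (r : Int) < x.2 - 1
  · have h2 : ¬ (x.2 - 1 = 0) := by omega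
    have h3 : ((r : Int) + 1) < x.2 := by omega
    simp [hcast, hc, h2, h3]
  · have h3 : ¬ (((r : Int) + 1) < x.2) := by omega
    simp [hcast, hc, h3]

lemma oeLoopA_eq : ∀ (fuel : Nat) (L : List (String × Int)) (m : Int),
    (∀ p ∈ L, 1 ≤ p.2) → (∀ p ∈ L, p.2 ≤ (fuel : Int)) →
    (∀ p ∈ L, p.2 ≤ m) → (m = 0 ∨ ∃ p ∈ L, p.2 = m) →
    oeLoopA fuel L = oeRows L m.toNat := by
  intro fuel
  induction fuel with
  | zero =>
    intro L m h1 h2 h3 h4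
    cases L with
    | cons q t =>
      exfalso
      have ha := h1 q (by simp)
      have hb := h2 q (by simp)
      push_cast at hb
      omega
    | nil =>
      have hm : m = 0 := by
        rcases h4 with h | ⟨p, hp, _⟩
        · exact h
        · simp at hp
      simp [oeLoopA, oeRows, hm]
  | succ f ih =>
    intro L m h1 h2 h3 h4
    match L with
    | [] =>
      have hm : m = 0 := by
        rcases h4 with h | ⟨p, hp, _⟩
        · exact h
        · simp at hp
      simp [oeLoopA, oeRows, hm]
    | q :: t =>
      have hm1 : 1 ≤ m := le_trans (h1 q (by simp)) (h3 q (by simp))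
      set L' := q :: t with hL
      set K := (L'.map (fun p => (p.1, p.2 - 1))).filter (fun p => !(p.2 == 0)) with hK
      have hmemK : ∀ p ∈ K, ∃ a ∈ L', p = (a.1, a.2 - 1) ∧ ¬ a.2 - 1 = 0 := by
        intro p hp
        rw [hK, List.mem_filter] at hp
        rcases List.mem_map.mp hp.1 with ⟨a, ha, rfl⟩
        exact ⟨a, ha, rfl, by simpa using hp.2⟩
      have k1 : ∀ p ∈ K, 1 ≤ p.2 := by
        intro p hp; rcases hmemK p hp with ⟨a, ha, rfl, hz⟩
        have := h1 a ha; simp; omega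
      have k2 : ∀ p ∈ K, p.2 ≤ (f : Int) := by
        intro p hp; rcases hmemK p hp with ⟨a, ha, rfl, _⟩
        have := h2 a ha; push_cast at *; simp; omega
      have k3 : ∀ p ∈ K, p.2 ≤ m - 1 := by
        intro p hp; rcases hmemK p hp with ⟨a, ha, rfl, _⟩
        have := h3 a ha; simp; omega
      have k4 : m - 1 = 0 ∨ ∃ p ∈ K, p.2 = m - 1 := by
        by_cases hm2 : m = 1
        · left; omega
        · right
          rcases h4 with h | ⟨p, hp, hpm⟩; · omega
          refine ⟨(p.1, p.2 - 1), ?_, by simp [hpm]⟩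
          rw [hK, List.mem_filter]
          exact ⟨List.mem_map.mpr ⟨p, hp, rfl⟩, by simp; omega⟩
      have hrec := ih K (m - 1) k1 k2 k3 k4
      have hne : L' ≠ [] := by simp [hL]
      have hrows : oeRows L' m.toNat = (L'.map Prod.fst) :: oeRows K (m - 1).toNat := by
        have hmt : m.toNat = (m - 1).toNat + 1 := by omega
        rw [oeRows, hmt, List.range_succ_eq_map, List.map_cons, List.map_map]
        congr 1
        · exact oeRow_zero L' h1
        · rw [oeRows]
          apply List.map_congr_left
          intro r _
          simp only [Function.comp]
          rw [oeRow_shift L' r h1]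
      rw [show oeLoopA (f + 1) L' = (L'.map Prod.fst) :: oeLoopA f K by
            simp [oeLoopA, hne, hK], hrec, hrows]

lemma mapIdx_nop {α : Type} (f : Nat → α → α) (l : List α) (h : ∀ i x, f i x = x) :
    l.mapIdx f = l := by
  induction l generalizing f with
  | nil => rfl
  | cons a t ih => rw [List.mapIdx_cons, h, ih (fun i => f (i + 1)) (fun i x => h (i + 1) x)]

lemma oeAddRows_eq (rows : List (List String)) (c : Int) (k : String) :
    oeAddRows rows c k = rows.mapIdx (fun i row => if (i : Int) < c then row ++ [k] else row) := by
  induction rows generalizing c with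
  | nil => rfl
  | cons row rest ih =>
    rw [List.mapIdx_cons]
    by_cases hc : 0 < c
    · rw [show oeAddRows (row :: rest) c k = (row ++ [k]) :: oeAddRows rest (c - 1) k by
            simp [oeAddRows, hc]]
      rw [ih (c - 1)]
      simp only [Nat.cast_zero, hc, if_true]
      congr 1
      have hfn : (fun (i : Nat) (row : List String) => if (i : Int) < c - 1 then row ++ [k] else row)
          = (fun (i : Nat) (row : List String) => if ((i + 1 : Nat) : Int) < c then row ++ [k] else row) := by
        funext i row
        have hiff : ((i : Int) < c - 1) ↔ (((i + 1 : Nat) : Int) < c) := by push_cast; omega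
        rw [if_congr hiff rfl rfl]
      rw [hfn]
    · rw [show oeAddRows (row :: rest) c k = row :: rest by simp [oeAddRows, hc]]
      simp only [Nat.cast_zero, hc, if_false]
      rw [mapIdx_nop]
      intro i x
      have : ¬ ((i : Int) + 1 < c) := by omega
      simp [this]

lemma mapIdx_map_range {β : Type} (m : Nat) (g : Nat → β) (f : Nat → β → β) :
    ((List.range m).map g).mapIdx f = (List.range m).map (fun r => f r (g r)) := by
  apply List.ext_getElem
  · simp
  · intro i h1 h2
    simp [List.getElem_mapIdx]

lemma oeFoldB : ∀ (L : List (String × Int)) (m : Nat) (g : Nat → List String),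
    L.foldl (fun res p => oeAddRows res p.2 p.1) ((List.range m).map g)
      = (List.range m).map (fun r => g r ++ oeRow L r) := by
  intro L
  induction L with
  | nil => intro m g; simp [oeRow]
  | cons p t ih =>
    intro m g
    rw [List.foldl_cons, oeAddRows_eq, mapIdx_map_range,
        ih m (fun r => if (r : Int) < p.2 then g r ++ [p.1] else g r)]
    apply List.map_congr_left
    intro r _
    by_cases h : (r : Int) < p.2
    · simp [oeRow, h]
    · simp [oeRow, h]

-- ===== VERDICT (by name: the statement is the Claim_ definition above) =====
theorem organize_exhibition_spec : Claim_equal_organize_exhibition := by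
  intro collection _
  unfold Spec_organize_exhibition organize_exhibition organize_exhibition_alt
  dsimp only
  rw [PySem.Dict.foldl_insert_getD_add_one_eq_counter]
  set cnt := PySem.Dict.counter collection with hcnt
  set M := PySem.List.maxD cnt.values (fun v => v) 0 with hM
  have hitems := PySem.Dict.items_counter collection
  have h1 : ∀ p ∈ cnt.items, 1 ≤ p.2 := by
    intro p hp
    rw [hitems] at hp
    rcases List.mem_map.mp hp with ⟨k, hk, rfl⟩
    have : k ∈ collection := (PySem.Set.mem_ofList collection k).mp hk
    have := List.count_pos_iff.mpr this
    simp; omega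
  have h2 : ∀ p ∈ cnt.items, p.2 ≤ (collection.length : Int) := by
    intro p hp
    rw [hitems] at hp
    rcases List.mem_map.mp hp with ⟨k, _, rfl⟩
    have := List.count_le_length (l := collection) (a := k)
    simp; omega
  have hvals : cnt.values = cnt.items.map Prod.snd := rfl
  have h3 : ∀ p ∈ cnt.items, p.2 ≤ M := by
    intro p hp
    rw [hM, PySem.List.maxD]
    cases h : PySem.List.max? cnt.values (fun v => v) with
    | none =>
      have : cnt.values = [] := (PySem.List.max?_eq_none_iff _ _).mp h
      rw [hvals] at this
      simp [List.map_eq_nil_iff.mp this] at hp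
    | some w =>
      have := PySem.List.max?_isMax h p.2 (by rw [hvals]; exact List.mem_map.mpr ⟨p, hp, rfl⟩)
      simpa using this
  have h4 : M = 0 ∨ ∃ p ∈ cnt.items, p.2 = M := by
    rw [hM, PySem.List.maxD]
    cases h : PySem.List.max? cnt.values (fun v => v) with
    | none => left; rfl
    | some w =>
      right
      have hw : w ∈ cnt.values := PySem.List.max?_mem h
      rw [hvals] at hw
      rcases List.mem_map.mp hw with ⟨p, hp, rfl⟩
      exact ⟨p, hp, rfl⟩
  rw [oeLoopA_eq collection.length cnt.items M h1 h2 h3 h4]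
  rw [show List.replicate M.toNat ([] : List String) = (List.range M.toNat).map (fun _ => []) by
        simp [List.map_const']]
  rw [oeFoldB]
  simp [oeRows]
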